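-- pv_equiv track=rewrite | github.com/finessetaste/menu-planner | backend/services/school_pdf_parser.py | _join_multiline_parens
-- ===== SOURCE A (Python) =====
-- def _join_multiline_parens(text: str) -> str:
--     """
--     Join multi-line parenthetical content onto one line so _PAREN_RE can strip it.
--     e.g. "(PICADA, ZANAHORIA,\nCEBOLLA, PIMIENTO)" → "(PICADA, ZANAHORIA, CEBOLLA, PIMIENTO)"
--     """
--     lines = text.splitlines()
--     result: list[str] = []
--     depth = 0
--     for line in lines:
--         if depth > 0 and result:
--             result[-1] += " " + line.strip()
--         else:
--             result.append(line)
--         depth += line.count("(") - line.count(")")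
--         if depth < 0:
--             depth = 0
--     return "\n".join(result)
-- ===== SOURCE B (Python) =====
-- def _join_multiline_parens(text: str) -> str:
--     """Group lines into paragraphs: an outer loop takes each line that starts at
--     paren depth 0 and an inner loop consumes the following lines while an open
--     paren is pending, appending their stripped text."""
--     lines = text.splitlines()
--     out = []
--     i = 0
--     n = len(lines)
--     while i < n:
--         cur = lines[i]
--         d = max(0, cur.count("(") - cur.count(")"))
--         i += 1
--         while d > 0 and i < n:
--             nxt = lines[i]
--             cur += " " + nxt.strip()
--             d = max(0, d + nxt.count("(") - nxt.count(")"))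
--             i += 1
--         out.append(cur)
--     return "\n".join(out)
-- ===== Notes on version B (the rewrite author's own statement) =====
-- stated objective: alternative
-- what changed: Replaced A's single fold that tracks a depth counter and mutates the last element of the result list with an outer loop over groups plus an inner loop that consumes all continuation lines of one parenthetical group at a time, so no result element is ever rewritten.
import Mathlib
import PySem

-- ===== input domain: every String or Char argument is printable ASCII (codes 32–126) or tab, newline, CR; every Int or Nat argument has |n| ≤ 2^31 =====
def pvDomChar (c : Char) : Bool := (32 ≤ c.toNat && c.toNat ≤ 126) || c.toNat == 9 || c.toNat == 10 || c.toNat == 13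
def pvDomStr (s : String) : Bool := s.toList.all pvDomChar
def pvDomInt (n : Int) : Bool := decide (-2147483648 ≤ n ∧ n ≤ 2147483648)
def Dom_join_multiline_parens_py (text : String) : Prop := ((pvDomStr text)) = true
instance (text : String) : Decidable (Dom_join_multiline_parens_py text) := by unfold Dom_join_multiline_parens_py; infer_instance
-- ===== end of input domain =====

-- B replaces A's single fold that mutates the last result element with an outer/inner
-- grouping loop (consume a whole parenthetical group at a time); objective: alternative.


-- ===== PORT A =====
-- one fold step of A's loop: join onto result[-1] while inside parens, else append; clamp depth at 0
def pvStepA (st : List String × Int) (line : String) : List String × Int :=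
  let result := st.1
  let depth := st.2
  let result' :=
    if depth > 0 ∧ result ≠ [] then
      result.dropLast ++ [result.getLastD "" ++ " " ++ PySem.Str.strip line]
    else
      result ++ [line]
  let d := depth + (PySem.Str.count line "(" : Int) - (PySem.Str.count line ")" : Int)
  (result', if d < 0 then 0 else d)

def join_multiline_parens_py (text : String) : String :=
  PySem.Str.join "\n" ((PySem.Str.splitlines text).foldl pvStepA ([], 0)).1

-- ===== PORT B =====
-- inner while-loop of B: consume lines while depth > 0, appending their stripped text
def pvConsume (cur : String) (d : Int) : List String → String × List String
  | [] => (cur, [])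
  | l :: rest =>
    if d > 0 then
      pvConsume (cur ++ " " ++ PySem.Str.strip l)
        (max 0 (d + (PySem.Str.count l "(" : Int) - (PySem.Str.count l ")" : Int))) rest
    else (cur, l :: rest)

theorem pvConsume_snd_length (cur : String) (d : Int) (ls : List String) :
    (pvConsume cur d ls).2.length ≤ ls.length := by
  induction ls generalizing cur d with
  | nil => simp [pvConsume]
  | cons l rest ih =>
    simp only [pvConsume]
    split
    · exact le_trans (ih _ _) (Nat.le_succ _)
    · simp

-- outer while-loop of B: each iteration emits one grouped output line
def pvGroup : List String → List String
  | [] => []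
  | l :: rest =>
    let p := pvConsume l (max 0 ((PySem.Str.count l "(" : Int) - (PySem.Str.count l ")" : Int))) rest
    p.1 :: pvGroup p.2
  termination_by ls => ls.length
  decreasing_by
    exact Nat.lt_succ_of_le (pvConsume_snd_length _ _ _)

def join_multiline_parens_py_alt (text : String) : String :=
  PySem.Str.join "\n" (pvGroup (PySem.Str.splitlines text))

-- ===== PRECONDITION & SPEC =====
def Spec_join_multiline_parens_py (text : String) (out : String) : Prop := out = join_multiline_parens_py_alt text
instance (text : String) (out : String) : Decidable (Spec_join_multiline_parens_py text out) := by unfold Spec_join_multiline_parens_py; infer_instance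

-- ===== CLAIM (what is proved, stated in full; the proofs are below) =====
def Claim_equal_join_multiline_parens_py : Prop := ∀ (text : String), Dom_join_multiline_parens_py text → Spec_join_multiline_parens_py text (join_multiline_parens_py text)

-- ===== LEMMAS AND PROOFS =====

theorem pv_clamp_eq (x : Int) : (if x < 0 then 0 else x) = max 0 x := by omega

-- loop invariant: A's fold from a nonempty result list (acc ++ [cur]) with carried
-- depth d ≥ 0 produces acc followed by B's grouping of cur and the remaining lines
theorem pv_key (lines : List String) (acc : List String) (cur : String) (d : Int)
    (hd : 0 ≤ d) :
    (lines.foldl pvStepA (acc ++ [cur], d)).1 =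
      acc ++ ((pvConsume cur d lines).1 :: pvGroup (pvConsume cur d lines).2) := by
  induction lines generalizing acc cur d with
  | nil => simp [pvConsume, pvGroup]
  | cons l rest ih =>
    by_cases h : d > 0
    · have hcond : d > 0 ∧ acc ++ [cur] ≠ [] := ⟨h, by simp⟩
      simp only [List.foldl_cons, pvStepA, pvConsume, if_pos hcond, if_pos h,
        List.dropLast_concat, List.getLastD_concat, pv_clamp_eq]
      exact ih _ _ _ (le_max_left 0 _)
    · have hd0 : d = 0 := by omega
      subst hd0
      have hcond : ¬((0:Int) > 0 ∧ acc ++ [cur] ≠ []) := by simp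
      simp only [List.foldl_cons, pvStepA, if_neg hcond, pv_clamp_eq]
      rw [show acc ++ [cur] ++ [l] = (acc ++ [cur]) ++ [l] from rfl,
        ih (acc ++ [cur]) l _ (le_max_left 0 _)]
      have hc : pvConsume cur 0 (l :: rest) = (cur, l :: rest) := by
        simp [pvConsume]
      simp [hc, pvGroup, zero_add]

-- ===== VERDICT (by name: the statement is the Claim_ definition above) =====
theorem join_multiline_parens_py_spec : Claim_equal_join_multiline_parens_py := by
  intro text _
  unfold Spec_join_multiline_parens_py join_multiline_parens_py join_multiline_parens_py_alt
  congr 1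
  cases hls : PySem.Str.splitlines text with
  | nil => simp [pvGroup]
  | cons l rest =>
    have h0 : pvStepA ([], 0) l =
        ([l], max 0 ((PySem.Str.count l "(" : Int) - (PySem.Str.count l ")" : Int))) := by
      simp [pvStepA]
      omega
    simp only [List.foldl_cons, h0]
    rw [show ([l] : List String) = [] ++ [l] from rfl, pv_key rest [] l _ (le_max_left 0 _)]
    simp [pvGroup]
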